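-- pv_equiv track=rewrite | github.com/hex7c0/EncryptoPy | modules/des/des1.py | __string_to_bit_list
-- ===== SOURCE A (Python) =====
-- def __string_to_bit_list(data):
--     '''
--     Turn the string data, into a list of bits (1, 0)'s
--     '''
--
--     l = len(data) * 8
--     result = [0] * l
--     pos = 0
--     for ch in data:
--         i = 7
--         while i >= 0:
--             if ch & (1 << i) != 0:
--                 result[pos] = 1
--             else:
--                 result[pos] = 0
--             pos += 1
--             i -= 1
--
--     return result
-- ===== SOURCE B (Python) =====
-- def __string_to_bit_list(data):
--     '''
--     Turn the string data, into a list of bits (1, 0)'s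
--     '''
--     table = [[(v >> i) & 1 for i in range(7, -1, -1)] for v in range(256)]
--     out = []
--     for ch in data:
--         out += table[ch & 255]
--     return out
-- ===== Notes on version B (the rewrite author's own statement) =====
-- stated objective: faster
-- what changed: Replaces A's preallocated zero-filled result array with per-bit positional index writes (nested while loop over bit positions) by a 256-entry byte-to-bits lookup table built once, with the result produced by flattening the table entry of each input byte in a single pass with no inner bit loop.
import Mathlib
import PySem

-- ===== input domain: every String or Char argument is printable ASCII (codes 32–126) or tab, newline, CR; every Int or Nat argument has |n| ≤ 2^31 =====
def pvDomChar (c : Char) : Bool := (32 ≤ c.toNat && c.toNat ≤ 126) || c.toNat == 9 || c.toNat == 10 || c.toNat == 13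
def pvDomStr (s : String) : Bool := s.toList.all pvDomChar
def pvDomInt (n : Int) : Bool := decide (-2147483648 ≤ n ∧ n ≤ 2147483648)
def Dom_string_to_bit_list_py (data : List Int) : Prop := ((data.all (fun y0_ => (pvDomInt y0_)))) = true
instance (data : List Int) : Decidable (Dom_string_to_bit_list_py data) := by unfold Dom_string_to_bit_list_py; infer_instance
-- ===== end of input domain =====

-- B replaces A's preallocated result array with per-bit index writes by a 256-entry
-- byte→bits lookup table built once, flattened over the input (objective: faster, measured; one table lookup per byte instead of eight bit tests).

-- ===== PORT A =====
-- the 'while i >= 0' inner loop of A: fuel n = i + 1, writes bit i at st.2 and advances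
def pvInnerA (ch : Int) : Nat → List Int × Nat → List Int × Nat
  | 0, st => st
  | n + 1, st =>
      let bit : Int := if PySem.Int.band ch ((1 : Int) <<< n) ≠ 0 then 1 else 0
      pvInnerA ch n (st.1.set st.2 bit, st.2 + 1)

def string_to_bit_list_py (data : List Int) : List Int :=
  let l := data.length * 8
  let result := List.replicate l (0 : Int)
  let st := data.foldl (fun (st : List Int × Nat) ch => pvInnerA ch 8 st) (result, 0)
  st.1

-- ===== PORT B =====
def string_to_bit_list_py_alt (data : List Int) : List Int :=
  let table := (List.range 256).map
    (fun v => (List.range 8).map (fun k => (((v >>> (7 - k)) &&& 1 : Nat) : Int)))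
  data.foldl (fun out ch => out ++ table.getD (PySem.Int.band ch 255).toNat []) []

-- ===== PRECONDITION & SPEC =====
def Spec_string_to_bit_list_py (data : List Int) (out : List Int) : Prop := out = string_to_bit_list_py_alt data
instance (data : List Int) (out : List Int) : Decidable (Spec_string_to_bit_list_py data out) := by unfold Spec_string_to_bit_list_py; infer_instance

-- ===== CLAIM (what is proved, stated in full; the proofs are below) =====
def Claim_equal_string_to_bit_list_py : Prop := ∀ (data : List Int), Dom_string_to_bit_list_py data → Spec_string_to_bit_list_py data (string_to_bit_list_py data)

-- ===== LEMMAS AND PROOFS =====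

-- the MSB-first 8-bit pattern of ch, as A computes each bit
def pvBitI (ch : Int) (i : Nat) : Int :=
  if PySem.Int.band ch ((1 : Int) <<< i) ≠ 0 then 1 else 0

def pvBits8 (ch : Int) : List Int := (List.range 8).map (fun k => pvBitI ch (7 - k))

def pvSeg (ch : Int) (n : Nat) : List Int := (List.range n).map (fun k => pvBitI ch (n - 1 - k))

theorem pvSeg_succ (ch : Int) (n : Nat) :
    pvSeg ch (n + 1) = pvBitI ch n :: pvSeg ch n := by
  unfold pvSeg
  rw [List.range_succ_eq_map, List.map_cons, List.map_map]
  simp only [Nat.add_sub_cancel, Nat.sub_zero]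
  congr 1
  apply List.map_congr_left
  intro k _
  simp only [Function.comp_apply]
  congr 1
  omega

theorem pvInnerA_spec (ch : Int) (n : Nat) : ∀ (res : List Int) (pos : Nat),
    pos + n ≤ res.length →
    pvInnerA ch n (res, pos) =
      (res.take pos ++ pvSeg ch n ++ res.drop (pos + n), pos + n) := by
  induction n with
  | zero =>
      intro res pos h
      simp [pvInnerA, pvSeg, List.take_append_drop]
  | succ n ih =>
      intro res pos h
      have hpos : pos < res.length := by omega
      have hlt : (res.take pos).length = pos := by
        rw [List.length_take]; omega
      have hset : res.set pos (pvBitI ch n) = res.take pos ++ pvBitI ch n :: res.drop (pos + 1) := by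
        rw [List.set_eq_take_append_cons_drop, if_pos hpos]
      have hlen : pos + 1 + n ≤ (res.set pos (pvBitI ch n)).length := by
        simp only [List.length_set]; omega
      have hstep : pvInnerA ch (n + 1) (res, pos)
          = pvInnerA ch n (res.set pos (pvBitI ch n), pos + 1) := by
        simp [pvInnerA, pvBitI]
      rw [hstep, ih _ _ hlen]
      have htake : (res.set pos (pvBitI ch n)).take (pos + 1)
          = res.take pos ++ [pvBitI ch n] := by
        rw [hset, List.take_append, hlt,
          List.take_of_length_le (by rw [hlt]; omega : (res.take pos).length ≤ pos + 1)]
        have h1 : pos + 1 - pos = 1 := by omega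
        rw [h1]
        simp
      have hdrop : (res.set pos (pvBitI ch n)).drop (pos + 1 + n) = res.drop (pos + (n + 1)) := by
        rw [hset, List.drop_append, hlt,
          List.drop_of_length_le (by rw [hlt]; omega : (res.take pos).length ≤ pos + 1 + n)]
        have h2 : pos + 1 + n - pos = n + 1 := by omega
        rw [h2, List.nil_append, List.drop_succ_cons, List.drop_drop]
        congr 1
        omega
      rw [htake, hdrop, pvSeg_succ, Prod.mk.injEq]
      exact ⟨by simp, by omega⟩

theorem pvSeg_eight (ch : Int) : pvSeg ch 8 = pvBits8 ch := rfl

theorem pvBits8_length (ch : Int) : (pvBits8 ch).length = 8 := by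
  simp [pvBits8]

-- A's outer fold, with an arbitrary already-written prefix
theorem pvOuterA (ds : List Int) : ∀ (done : List Int),
    (ds.foldl (fun (st : List Int × Nat) ch => pvInnerA ch 8 st)
      (done ++ List.replicate (ds.length * 8) (0 : Int), done.length)).1
    = done ++ ds.flatMap pvBits8 := by
  induction ds with
  | nil => intro done; simp
  | cons ch ds ih =>
      intro done
      have hlen : done.length + 8 ≤ (done ++ List.replicate ((ch :: ds).length * 8) (0 : Int)).length := by
        simp only [List.length_append, List.length_replicate, List.length_cons]; omega
      rw [List.foldl_cons, pvInnerA_spec ch 8 _ _ hlen]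
      have htake : (done ++ List.replicate ((ch :: ds).length * 8) (0 : Int)).take done.length = done := by
        simp
      have hdrop : (done ++ List.replicate ((ch :: ds).length * 8) (0 : Int)).drop (done.length + 8)
          = List.replicate (ds.length * 8) (0 : Int) := by
        rw [List.drop_append, List.drop_of_length_le (by omega : done.length ≤ done.length + 8),
          List.nil_append]
        have h8 : done.length + 8 - done.length = 8 := by omega
        rw [h8, List.drop_replicate]
        congr 1
        simp only [List.length_cons]
        omega
      rw [htake, hdrop, pvSeg_eight]
      have harr : done ++ (pvBits8 ch ++ List.replicate (ds.length * 8) (0 : Int))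
          = (done ++ pvBits8 ch) ++ List.replicate (ds.length * 8) (0 : Int) := by
        simp
      have hpos : done.length + 8 = (done ++ pvBits8 ch).length := by
        simp [pvBits8_length]
      rw [List.append_assoc, harr, hpos, ih (done ++ pvBits8 ch)]
      simp

-- ===== the pointwise byte/bit lemmas =====

theorem pvNatMask (n : Nat) : n &&& 255 = n % 256 := by
  have := Nat.and_two_pow_sub_one_eq_mod n 8
  norm_num at this
  exact this

theorem pvBandMask (ch : Int) : PySem.Int.band ch 255 = ch % 256 := by
  by_cases h : 0 ≤ ch
  · rw [PySem.Int.band_of_nonneg h (by norm_num)]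
    have h255 : (255 : Int).toNat = 255 := rfl
    rw [h255, pvNatMask]
    omega
  · rw [not_le] at h
    have hdef : PySem.Int.band ch 255
        = ((255 - (255 &&& (-ch - 1).toNat) : Nat) : Int) := by
      simp [PySem.Int.band, not_le.2 h]
    rw [hdef, Nat.and_comm, pvNatMask]
    have hm : ((-ch - 1).toNat : Int) = -ch - 1 := by omega
    omega

theorem pvAndTwoPowMod (n : Nat) (i : Nat) (hi : i < 8) :
    n &&& 2 ^ i = (n % 256) &&& 2 ^ i := by
  have h1 : n &&& 2 ^ i = (n.testBit i).toNat * 2 ^ i := Nat.and_two_pow n i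
  have h2 : (n % 256) &&& 2 ^ i = ((n % 256).testBit i).toNat * 2 ^ i := Nat.and_two_pow _ i
  have h3 : (n % 256).testBit i = n.testBit i := by
    have : (256 : Nat) = 2 ^ 8 := by norm_num
    rw [this, Nat.testBit_mod_two_pow]
    simp [hi]
  rw [h1, h2, h3]

theorem pvShiftOne (i : Nat) : ((1 : Int) <<< i) = ((2 ^ i : Nat) : Int) := by
  rw [Int.shiftLeft_eq]
  push_cast
  ring

-- bounded facts on bytes, decided outright
set_option maxRecDepth 10000 in
theorem pvByteBit : ∀ x < 256, ∀ i < 8, x >>> i &&& 1 = if x &&& 2 ^ i ≠ 0 then 1 else 0 := by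
  decide

set_option maxRecDepth 10000 in
theorem pvByteNegBit : ∀ x < 256, ∀ i < 8, ((255 - x) &&& 2 ^ i ≠ 0 ↔ 2 ^ i - (2 ^ i &&& x) ≠ 0) := by
  decide

-- KEY: B's table bit equals A's bit test, for every Int byte source
theorem pvKey (ch : Int) (i : Nat) (hi : i < 8) :
    ((((PySem.Int.band ch 255).toNat >>> i) &&& 1 : Nat) : Int) = pvBitI ch i := by
  have hv : (PySem.Int.band ch 255).toNat = (ch % 256).toNat := by rw [pvBandMask]
  have hvlt : (ch % 256).toNat < 256 := by omega
  rw [hv, pvByteBit _ hvlt _ hi]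
  unfold pvBitI
  rw [pvShiftOne]
  by_cases h : 0 ≤ ch
  · rw [PySem.Int.band_of_nonneg h (by positivity)]
    rw [Int.toNat_natCast]
    have hmod : (ch % 256).toNat = ch.toNat % 256 := by omega
    rw [hmod, ← pvAndTwoPowMod ch.toNat i hi]
    by_cases hz : ch.toNat &&& 2 ^ i = 0 <;> simp [hz]
  · rw [not_le] at h
    set m : Nat := (-ch - 1).toNat with hm
    have hb : (0 : Int) ≤ ((2 ^ i : Nat) : Int) := by positivity
    have hdef : PySem.Int.band ch ((2 ^ i : Nat) : Int)
        = ((2 ^ i - (2 ^ i &&& m) : Nat) : Int) := by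
      unfold PySem.Int.band
      rw [if_neg (not_le.2 h), if_pos hb, Int.toNat_natCast, ← hm]
    have hmi : (m : Int) = -ch - 1 := by omega
    have hveq : (ch % 256).toNat = 255 - m % 256 := by omega
    rw [hdef, hveq]
    have hswap : 2 ^ i &&& m = 2 ^ i &&& (m % 256) := by
      rw [Nat.and_comm, pvAndTwoPowMod m i hi, Nat.and_comm]
    rw [hswap]
    have hbb := pvByteNegBit (m % 256) (by omega) i hi
    by_cases hz : (255 - m % 256) &&& 2 ^ i = 0
    · have : 2 ^ i - (2 ^ i &&& (m % 256)) = 0 := by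
        by_contra hne; exact (hbb.mpr hne) hz
      simp [hz, this]
    · have : 2 ^ i - (2 ^ i &&& (m % 256)) ≠ 0 := hbb.mp hz
      simp [hz, this]

-- B's table entry for ch is exactly pvBits8 ch
theorem pvTableEntry (ch : Int) :
    ((List.range 256).map
      (fun v => (List.range 8).map (fun k => (((v >>> (7 - k)) &&& 1 : Nat) : Int)))).getD
        (PySem.Int.band ch 255).toNat [] = pvBits8 ch := by
  have hv : (PySem.Int.band ch 255).toNat < 256 := by
    have := pvBandMask ch
    omega
  rw [List.getD_eq_getElem?_getD, List.getElem?_map, List.getElem?_range hv]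
  simp only [Option.map_some, Option.getD_some]
  unfold pvBits8
  apply List.map_congr_left
  intro k hk
  have hk8 : k < 8 := List.mem_range.mp hk
  exact pvKey ch (7 - k) (by omega)

theorem pvAltFlat (ds : List Int) : ∀ (acc : List Int),
    ds.foldl (fun out ch => out ++
      ((List.range 256).map
        (fun v => (List.range 8).map (fun k => (((v >>> (7 - k)) &&& 1 : Nat) : Int)))).getD
          (PySem.Int.band ch 255).toNat []) acc
    = acc ++ ds.flatMap pvBits8 := by
  induction ds with
  | nil => intro acc; simp
  | cons ch ds ih =>
      intro acc
      rw [List.foldl_cons, pvTableEntry, ih]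
      simp

-- ===== VERDICT (by name: the statement is the Claim_ definition above) =====
theorem string_to_bit_list_py_spec : Claim_equal_string_to_bit_list_py := by
  intro data _
  unfold Spec_string_to_bit_list_py string_to_bit_list_py string_to_bit_list_py_alt
  have hA := pvOuterA data []
  simp only [List.nil_append, List.length_nil] at hA
  rw [hA, pvAltFlat data []]
  simp
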